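-- pv_equiv track=rewrite | github.com/ejosmel/ia2025 | tarea1/separar_ordenar_numeros.py | separar_ordenar_numeros
-- ===== SOURCE A (Python) =====
-- def separar_ordenar_numeros(lista_enteros):
--
--     negativos = []
--     positivos = []
--     lista_enteros.sort()
--     for numero in lista_enteros:
--         if numero < 0:
--             negativos.append(numero)
--         elif numero > 0:
--             positivos.append(numero)
--     return negativos, positivos
-- ===== SOURCE B (Python) =====
-- def _bisect_left(s, x):
--     lo, hi = 0, len(s)
--     while lo < hi:
--         mid = (lo + hi) // 2
--         if s[mid] < x:
--             lo = mid + 1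
--         else:
--             hi = mid
--     return lo
--
--
-- def _bisect_right(s, x):
--     lo, hi = 0, len(s)
--     while lo < hi:
--         mid = (lo + hi) // 2
--         if s[mid] <= x:
--             lo = mid + 1
--         else:
--             hi = mid
--     return lo
--
--
-- def separar_ordenar_numeros(lista_enteros):
--     lista_enteros.sort()
--     return (lista_enteros[:_bisect_left(lista_enteros, 0)],
--             lista_enteros[_bisect_right(lista_enteros, 0):])
-- ===== Notes on version B (the rewrite author's own statement) =====
-- stated objective: alternative
-- what changed: After the in-place sort, B locates the zero boundaries by two binary searches (hand-written bisect_left/bisect_right) and returns slices, instead of A's linear scan that appends each element to one of two accumulator lists.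
import Mathlib
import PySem

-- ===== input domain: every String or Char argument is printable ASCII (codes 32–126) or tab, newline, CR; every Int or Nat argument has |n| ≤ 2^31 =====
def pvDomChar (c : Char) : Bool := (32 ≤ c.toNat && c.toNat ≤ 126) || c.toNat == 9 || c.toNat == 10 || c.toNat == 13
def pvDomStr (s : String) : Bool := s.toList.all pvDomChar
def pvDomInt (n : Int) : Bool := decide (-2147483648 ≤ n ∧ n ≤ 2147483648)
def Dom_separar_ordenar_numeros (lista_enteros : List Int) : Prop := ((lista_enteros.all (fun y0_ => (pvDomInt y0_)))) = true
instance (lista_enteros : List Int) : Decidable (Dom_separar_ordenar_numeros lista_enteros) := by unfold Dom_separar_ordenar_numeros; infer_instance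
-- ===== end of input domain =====

-- B replaces A's linear partition scan over the sorted list by two binary searches for the zero
-- boundaries plus slicing (objective: alternative). Both A and B sort the argument in place
-- (same mutation); the theorems here are about the return value.

-- ===== PORT A =====
-- for numero in sorted list: numero < 0 → append to negativos; numero > 0 → append to positivos
def separar_ordenar_numeros (lista_enteros : List Int) : List Int × List Int :=
  (PySem.List.sorted lista_enteros (fun x => x) false).foldl
    (fun acc numero =>
      if numero < 0 then (acc.1 ++ [numero], acc.2)
      else if numero > 0 then (acc.1, acc.2 ++ [numero])
      else acc)
    ([], [])

-- ===== PORT B =====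
-- Source B's hand-written _bisect_left/_bisect_right are exactly the loops of PySem.List.bisectLeft /
-- bisectRight (lo/hi halving, s[mid] < x resp. s[mid] <= x); slices s[:k] / s[k:] with 0 ≤ k ≤ len
-- are take/drop.
def separar_ordenar_numeros_alt (lista_enteros : List Int) : List Int × List Int :=
  let s := PySem.List.sorted lista_enteros (fun x => x) false
  (s.take (PySem.List.bisectLeft s 0), s.drop (PySem.List.bisectRight s 0))

-- ===== PRECONDITION & SPEC =====
def Spec_separar_ordenar_numeros (lista_enteros : List Int) (out : List Int × List Int) : Prop := out = separar_ordenar_numeros_alt lista_enteros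
instance (lista_enteros : List Int) (out : List Int × List Int) : Decidable (Spec_separar_ordenar_numeros lista_enteros out) := by unfold Spec_separar_ordenar_numeros; infer_instance

-- ===== CLAIM (what is proved, stated in full; the proofs are below) =====
def Claim_equal_separar_ordenar_numeros : Prop := ∀ (lista_enteros : List Int), Dom_separar_ordenar_numeros lista_enteros → Spec_separar_ordenar_numeros lista_enteros (separar_ordenar_numeros lista_enteros)

-- ===== LEMMAS AND PROOFS =====

-- A's loop is the pair of filters of the traversed list, appended to the accumulators.
theorem sep_foldl_eq_filter (s : List Int) (n p : List Int) :
    s.foldl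
      (fun acc numero =>
        if numero < 0 then (acc.1 ++ [numero], acc.2)
        else if numero > 0 then (acc.1, acc.2 ++ [numero])
        else acc)
      (n, p)
    = (n ++ s.filter (fun x => decide (x < 0)), p ++ s.filter (fun x => decide (x > 0))) := by
  induction s generalizing n p with
  | nil => simp
  | cons a t ih =>
    by_cases h1 : a < 0
    · have h2 : ¬ a > 0 := by omega
      simp [List.foldl_cons, h1, ih, h2]
    · by_cases h2 : a > 0
      · simp [List.foldl_cons, h1, h2, ih]
      · simp [List.foldl_cons, h1, h2, ih]

-- If p holds exactly on the first k positions, the filter is the k-prefix.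
theorem filter_eq_take_of_split (s : List Int) (p : Int → Bool) (k : Nat) (hk : k ≤ s.length)
    (h1 : ∀ (j : Nat) (hj : j < s.length), j < k → p s[j])
    (h2 : ∀ (j : Nat) (hj : j < s.length), k ≤ j → ¬ p s[j]) :
    s.filter p = s.take k := by
  conv_lhs => rw [← List.take_append_drop k s]
  rw [List.filter_append]
  have ht : (s.take k).filter p = s.take k := by
    apply List.filter_eq_self.mpr
    intro x hx
    rcases List.mem_iff_getElem.mp hx with ⟨i, hi, rfl⟩
    have hik : i < k := lt_of_lt_of_le hi (by simp)
    have hil : i < s.length := lt_of_lt_of_le hik hk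
    rw [List.getElem_take]
    exact h1 i hil hik
  have hd : (s.drop k).filter p = [] := by
    apply List.filter_eq_nil_iff.mpr
    intro x hx
    rcases List.mem_iff_getElem.mp hx with ⟨i, hi, rfl⟩
    rw [List.getElem_drop]
    exact h2 (k + i) (by simp at hi; omega) (Nat.le_add_right _ _)
  rw [ht, hd, List.append_nil]

-- If p fails exactly on the first k positions, the filter is the k-suffix.
theorem filter_eq_drop_of_split (s : List Int) (p : Int → Bool) (k : Nat) (hk : k ≤ s.length)
    (h1 : ∀ (j : Nat) (hj : j < s.length), j < k → ¬ p s[j])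
    (h2 : ∀ (j : Nat) (hj : j < s.length), k ≤ j → p s[j]) :
    s.filter p = s.drop k := by
  conv_lhs => rw [← List.take_append_drop k s]
  rw [List.filter_append]
  have ht : (s.take k).filter p = [] := by
    apply List.filter_eq_nil_iff.mpr
    intro x hx
    rcases List.mem_iff_getElem.mp hx with ⟨i, hi, rfl⟩
    have hik : i < k := lt_of_lt_of_le hi (by simp)
    have hil : i < s.length := lt_of_lt_of_le hik hk
    rw [List.getElem_take]
    exact h1 i hil hik
  have hd : (s.drop k).filter p = s.drop k := by
    apply List.filter_eq_self.mpr
    intro x hx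
    rcases List.mem_iff_getElem.mp hx with ⟨i, hi, rfl⟩
    rw [List.getElem_drop]
    exact h2 (k + i) (by simp at hi; omega) (Nat.le_add_right _ _)
  rw [ht, hd, List.nil_append]

-- ===== VERDICT (by name: the statement is the Claim_ definition above) =====
theorem separar_ordenar_numeros_spec : Claim_equal_separar_ordenar_numeros := by
  intro l _
  unfold Spec_separar_ordenar_numeros separar_ordenar_numeros separar_ordenar_numeros_alt
  set s := PySem.List.sorted l (fun x => x) false with hs
  have hpw : s.Pairwise (fun a b => a ≤ b) := by
    simpa using PySem.List.sorted_pairwise l (fun x => x)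
  obtain ⟨hbl_le, hbl_lt, hbl_ge⟩ := PySem.List.bisectLeft_spec s 0 hpw
  obtain ⟨hbr_le, hbr_lt, hbr_ge⟩ := PySem.List.bisectRight_spec s 0 hpw
  rw [sep_foldl_eq_filter s [] []]
  simp only [List.nil_append]
  refine Prod.ext ?_ ?_
  · show s.filter (fun x => decide (x < 0)) = s.take (PySem.List.bisectLeft s 0)
    apply filter_eq_take_of_split s _ _ hbl_le
    · intro j hj hjk; simpa using hbl_lt j hj hjk
    · intro j hj hjk; simpa using hbl_ge j hj hjk
  · show s.filter (fun x => decide (x > 0)) = s.drop (PySem.List.bisectRight s 0)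
    apply filter_eq_drop_of_split s _ _ hbr_le
    · intro j hj hjk
      have := hbr_lt j hj hjk; simp; omega
    · intro j hj hjk; simpa using hbr_ge j hj hjk
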